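-- pv_equiv track=rewrite | github.com/ayush-bothra/daa-lab | lab_6/LCS.py | lcs_multiple
-- ===== SOURCE A (Python) =====
-- def lcs_multiple(sequences):
--     def lcs(seq1, seq2):
--         dp = [[""] * (len(seq2) + 1) for _ in range(len(seq1) + 1)]
--         directions = [[None] * (len(seq2) + 1) for _ in range(len(seq1) + 1)]
--
--         for i in range(1, len(seq1) + 1):
--             for j in range(1, len(seq2) + 1):
--                 if seq1[i - 1] == seq2[j - 1]:
--                     dp[i][j] = dp[i - 1][j - 1] + seq1[i - 1]
--                     directions[i][j] = "diag"  # Move diagonally (character match)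
--                 elif len(dp[i - 1][j]) >= len(dp[i][j - 1]):
--                     dp[i][j] = dp[i - 1][j]
--                     directions[i][j] = "up"    # Move up
--                 else:
--                     dp[i][j] = dp[i][j - 1]
--                     directions[i][j] = "left"  # Move left
--
--         return dp[-1][-1], directions
--
--     # Start with the LCS of the first two sequences
--     max_sequence = ""
--     for i in range(len(sequences)):
--         common_sequence = sequences[i]
--
--         for j in range(len(sequences)):
--             common_sequence, directions = lcs(common_sequence, sequences[j])
--             if not common_sequence:  # If common subsequence is empty, break early
--                 break
--         max_sequence = max(max_sequence, common_sequence, key=len)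
--
--     return max_sequence, directions
-- ===== SOURCE B (Python) =====
-- def lcs_multiple(sequences):
--     def lcs(a, b):
--         # staged passes: length-only DP table, then a directions matrix derived
--         # from the table, then one backtrack to rebuild the subsequence string
--         n, m = len(a), len(b)
--         table = [[0] * (m + 1)]
--         for c in a:
--             prev = table[-1]
--             cur = [0]
--             for j in range(m):
--                 cur.append(prev[j] + 1 if c == b[j] else max(prev[j + 1], cur[-1]))
--             table.append(cur)
--         dirs = [[None] * (m + 1)]
--         for i in range(n):
--             row = [None]
--             for j in range(m):
--                 if a[i] == b[j]:
--                     row.append("diag")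
--                 elif table[i + 1][j] <= table[i][j + 1]:
--                     row.append("up")
--                 else:
--                     row.append("left")
--             dirs.append(row)
--         chars = []
--         i, j = n, m
--         while i and j:
--             d = dirs[i][j]
--             if d == "diag":
--                 chars.append(a[i - 1])
--                 i -= 1
--                 j -= 1
--             elif d == "up":
--                 i -= 1
--             else:
--                 j -= 1
--         return "".join(reversed(chars)), dirs
--
--     def reduce(start):
--         common, dirs, stopped = start, [], False
--         for t in sequences:
--             if not stopped:
--                 common, dirs = lcs(common, t)
--                 stopped = common == ""
--         return common, dirs
--
--     results = [reduce(s) for s in sequences]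
--     best = ""
--     for c, _ in results:
--         if len(best) < len(c):
--             best = c
--     return best, results[-1][1]
-- ===== Notes on version B (the rewrite author's own statement) =====
-- stated objective: alternative
-- what changed: B replaces A's per-cell string-storing single-pass DP by staged passes: a length-only DP table, a directions matrix derived from the table in a second pass, and one backtrack to rebuild the string; the outer aggregation becomes a map of a fold-with-stop-flag over the sequences plus a separate max-by-length fold, instead of A's nested index loops with an early break.
-- outside the precondition, e.g. on lcs_multiple([]): A raises UnboundLocalError, B raises IndexError
import Mathlib
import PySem

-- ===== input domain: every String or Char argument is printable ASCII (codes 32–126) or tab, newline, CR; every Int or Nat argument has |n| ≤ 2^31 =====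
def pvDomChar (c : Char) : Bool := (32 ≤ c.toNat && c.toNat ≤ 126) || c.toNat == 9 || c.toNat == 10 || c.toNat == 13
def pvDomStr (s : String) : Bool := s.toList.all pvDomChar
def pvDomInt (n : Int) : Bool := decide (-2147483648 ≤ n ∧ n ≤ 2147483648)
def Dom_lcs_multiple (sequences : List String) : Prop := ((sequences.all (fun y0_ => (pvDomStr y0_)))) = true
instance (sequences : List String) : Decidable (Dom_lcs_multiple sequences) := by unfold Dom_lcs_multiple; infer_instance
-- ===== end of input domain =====

-- B replaces A's per-cell string-building DP by staged passes (length-only DP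
-- table, then a directions matrix derived from it, then one backtrack) and the
-- outer index loops by a map + folds: a different decomposition of the task.

-- ===== PORT A =====
-- Python strings are modeled as List Char inside the helpers (exact on the ASCII
-- domain); the final cell is converted back with String.mk.
-- one row of A's inner j-loop: `left` = dp[i][j-1], `diag` = dp[i-1][j-1],
-- the list carries (seq2[j-1], dp[i-1][j]) for the remaining j.
def rowA (c1 : Char) : List Char → List Char → List (Char × List Char) → List (List Char × Option String)
  | _, _, [] => []
  | left, diag, (c2, up) :: rest =>
    if c1 = c2 then
      (diag ++ [c1], some "diag") :: rowA c1 (diag ++ [c1]) up rest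
    else if left.length ≤ up.length then
      (up, some "up") :: rowA c1 up up rest
    else
      (left, some "left") :: rowA c1 left up rest

-- A's i-loop: state = previous dp row and the directions rows built so far;
-- at the end returns dp[-1][-1] (last cell of the last row) and the matrix.
def loopA (s2 : List Char) : List Char → List (List Char) → List (List (Option String)) → List Char × List (List (Option String))
  | [], prevRow, dirs => (prevRow.getLastD [], dirs)
  | c1 :: rest, prevRow, dirs =>
    let row := rowA c1 [] (prevRow.headD []) (s2.zip (prevRow.drop 1))
    loopA s2 rest ([] :: row.map Prod.fst) (dirs ++ [none :: row.map Prod.snd])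

def lcsA (seq1 seq2 : String) : String × List (List (Option String)) :=
  let s1 := seq1.toList
  let s2 := seq2.toList
  let r := loopA s2 s1 (List.replicate (s2.length + 1) []) [List.replicate (s2.length + 1) none]
  (String.mk r.1, r.2)

-- inner j-loop over all sequences, with the early break on an empty LCS
def innerA : String → List (List (Option String)) → List String → String × List (List (Option String))
  | common, dirs, [] => (common, dirs)
  | common, dirs, s :: rest =>
    let r := lcsA common s
    if r.1 = "" then r else innerA r.1 r.2 rest

-- outer i-loop; max(a, b, key=len) keeps the first argument on a tie
def outerA (seqs : List String) : String → List (List (Option String)) → List String → String × List (List (Option String))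
  | maxSeq, dirs, [] => (maxSeq, dirs)
  | maxSeq, dirs, s :: rest =>
    let r := innerA s dirs seqs
    outerA seqs (if maxSeq.length < r.1.length then r.1 else maxSeq) r.2 rest

def lcs_multiple (sequences : List String) : String × List (List (Option String)) :=
  outerA sequences "" [] sequences

-- ===== PORT B =====
-- pass 1, one row of the length-only DP: Source B's `for j in range(m)` appends
-- prev[j]+1 on a match, else max(prev[j+1], cur[-1]); the fold runs over
-- zip(b, zip(prev, prev[1:])) = the triples (b[j], prev[j], prev[j+1]).
def rowLenB (c : Char) (b : List Char) (prev : List Nat) : List Nat :=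
  (b.zip (prev.zip (prev.drop 1))).foldl
    (fun cur p => cur ++ [if c = p.1 then p.2.1 + 1 else max p.2.2 (cur.getLastD 0)]) [0]

-- pass 1, the whole table: table.append(row(c, b, table[-1])) for each c of a
def tableB (a b : List Char) : List (List Nat) :=
  a.foldl (fun T c => T ++ [rowLenB c b (T.getLastD [])]) [List.replicate (b.length + 1) 0]

-- pass 2, one directions row, read off the finished length table
-- (rp = table[i], rc = table[i+1]; up = rp[j+1], left = rc[j])
def dirRowB (c : Char) (b : List Char) (rp rc : List Nat) : List (Option String) :=
  none :: (List.range b.length).map (fun j =>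
    if c = b.getD j ' ' then some "diag"
    else if rc.getD j 0 ≤ rp.getD (j + 1) 0 then some "up"
    else some "left")

-- pass 2, the directions matrix
def dirsB (a b : List Char) (T : List (List Nat)) : List (List (Option String)) :=
  List.replicate (b.length + 1) none ::
    (List.range a.length).map (fun i => dirRowB (a.getD i ' ') b (T.getD i []) (T.getD (i + 1) []))

-- pass 3, Source B's backtrack while-loop (appending then reversing = consing here);
-- directions[i][j] is read with getD, always in range while 0 < i and 0 < j.
def backtrack (dirs : List (List (Option String))) (s1 : List Char) (i j : Nat) (acc : List Char) : List Char :=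
  if h : 0 < i ∧ 0 < j then
    if (dirs.getD i []).getD j none = some "diag" then backtrack dirs s1 (i - 1) (j - 1) (s1.getD (i - 1) ' ' :: acc)
    else if (dirs.getD i []).getD j none = some "up" then backtrack dirs s1 (i - 1) j acc
    else backtrack dirs s1 i (j - 1) acc
  else acc
termination_by i + j
decreasing_by all_goals omega

def lcsB (seq1 seq2 : String) : String × List (List (Option String)) :=
  let a := seq1.toList
  let b := seq2.toList
  let T := tableB a b
  let dirs := dirsB a b T
  (String.mk (backtrack dirs a a.length b.length []), dirs)

-- Source B's reduce(start): a fold with a stop flag instead of an early break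
def stepR (st : String × List (List (Option String)) × Bool) (t : String) : String × List (List (Option String)) × Bool :=
  if st.2.2 then st
  else
    let p := lcsB st.1 t
    (p.1, p.2, decide (p.1 = ""))

def reduceB (seqs : List String) (start : String) : String × List (List (Option String)) :=
  let f := seqs.foldl stepR (start, [], false)
  (f.1, f.2.1)

-- Source B's final max-by-length fold over the collected results
def bestStep (best : String) (r : String × List (List (Option String))) : String :=
  if best.length < r.1.length then r.1 else best

def lcs_multiple_alt (sequences : List String) : String × List (List (Option String)) :=
  let results := sequences.map (reduceB sequences)
  (results.foldl bestStep "", (results.getLastD ("", [])).2)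

-- ===== PRECONDITION & SPEC =====
-- On [] the Python A raises UnboundLocalError (`directions` is never assigned)
-- and B raises IndexError (results[-1]); Pre_ excludes exactly that input.
def Pre_lcs_multiple (sequences : List String) : Prop := sequences ≠ []
instance (sequences : List String) : Decidable (Pre_lcs_multiple sequences) := by unfold Pre_lcs_multiple; infer_instance
def pvWitness_lcs_multiple : List String := (["abc", "bc"])

def Spec_lcs_multiple (sequences : List String) (out : String × List (List (Option String))) : Prop := out = lcs_multiple_alt sequences
instance (sequences : List String) (out : String × List (List (Option String))) : Decidable (Spec_lcs_multiple sequences out) := by unfold Spec_lcs_multiple; infer_instance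

-- ===== CLAIM (what is proved, stated in full; the proofs are below) =====
def Claim_equal_lcs_multiple : Prop := ∀ (sequences : List String), Dom_lcs_multiple sequences → Pre_lcs_multiple sequences → Spec_lcs_multiple sequences (lcs_multiple sequences)

-- ===== LEMMAS AND PROOFS =====

-- `tab f s k` = [f s, f (s+1), …, f (s+k-1)], the tabulation used to describe rows
def tab {α : Type} (f : Nat → α) : Nat → Nat → List α
  | _, 0 => []
  | s, k + 1 => f s :: tab f (s + 1) k

-- the dp string of A at cell (i, j), as a plain recursive specification
def dps (s1 s2 : List Char) : Nat → Nat → List Char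
  | 0, _ => []
  | _ + 1, 0 => []
  | i + 1, j + 1 =>
    if s1.getD i ' ' = s2.getD j ' ' then dps s1 s2 i j ++ [s1.getD i ' ']
    else if (dps s1 s2 (i + 1) j).length ≤ (dps s1 s2 i (j + 1)).length then dps s1 s2 i (j + 1)
    else dps s1 s2 (i + 1) j
termination_by i j => i + j

-- the direction at cell (i, j)
def dirS (s1 s2 : List Char) : Nat → Nat → Option String
  | 0, _ => none
  | _ + 1, 0 => none
  | i + 1, j + 1 =>
    if s1.getD i ' ' = s2.getD j ' ' then some "diag"
    else if (dps s1 s2 (i + 1) j).length ≤ (dps s1 s2 i (j + 1)).length then some "up"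
    else some "left"

-- the directions matrix both ports build
def dirsMat (s1 s2 : List Char) : List (List (Option String)) :=
  List.replicate (s2.length + 1) none ::
    tab (fun r => none :: tab (fun t => dirS s1 s2 r t) 1 s2.length) 1 s1.length

theorem dps_succ (s1 s2 : List Char) (i j : Nat) :
    dps s1 s2 (i + 1) (j + 1) =
      if s1.getD i ' ' = s2.getD j ' ' then dps s1 s2 i j ++ [s1.getD i ' ']
      else if (dps s1 s2 (i + 1) j).length ≤ (dps s1 s2 i (j + 1)).length then dps s1 s2 i (j + 1)
      else dps s1 s2 (i + 1) j := by
  rw [dps]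

theorem dps_zero_left (s1 s2 : List Char) (j : Nat) : dps s1 s2 0 j = [] := by
  rw [dps]

theorem dps_zero_right (s1 s2 : List Char) (i : Nat) : dps s1 s2 i 0 = [] := by
  cases i <;> rw [dps]

theorem dirS_succ (s1 s2 : List Char) (i j : Nat) :
    dirS s1 s2 (i + 1) (j + 1) =
      if s1.getD i ' ' = s2.getD j ' ' then some "diag"
      else if (dps s1 s2 (i + 1) j).length ≤ (dps s1 s2 i (j + 1)).length then some "up"
      else some "left" := rfl

theorem tab_map {α β : Type} (f : Nat → α) (g : α → β) : ∀ (k s : Nat), (tab f s k).map g = tab (fun t => g (f t)) s k := by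
  intro k
  induction k with
  | zero => intro s; rfl
  | succ k ih => intro s; simp [tab, ih]

theorem tab_const {α : Type} (f : Nat → α) (a : α) (hf : ∀ t, f t = a) : ∀ (k s : Nat), tab f s k = List.replicate k a := by
  intro k
  induction k with
  | zero => intro s; rfl
  | succ k ih => intro s; simp [tab, ih, hf, List.replicate_succ]

theorem tab_getLastD {α : Type} (f : Nat → α) : ∀ (k s : Nat) (d : α), (tab f s (k + 1)).getLastD d = f (s + k) := by
  intro k
  induction k with
  | zero => intro s d; rfl
  | succ k ih =>
    intro s d
    show (f s :: tab f (s + 1) (k + 1)).getLastD d = f (s + (k + 1))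
    rw [List.getLastD_cons, ih]
    congr 1
    omega

theorem tab_map_fst {α β : Type} (f : Nat → α) (g : Nat → β) (k s : Nat) :
    (tab (fun t => (f t, g t)) s k).map Prod.fst = tab f s k := by
  rw [tab_map]

theorem tab_map_snd {α β : Type} (f : Nat → α) (g : Nat → β) (k s : Nat) :
    (tab (fun t => (f t, g t)) s k).map Prod.snd = tab g s k := by
  rw [tab_map]

theorem tab_getD {α : Type} (f : Nat → α) (d : α) : ∀ (k s j : Nat), j < k → (tab f s k).getD j d = f (s + j) := by
  intro k
  induction k with
  | zero => intro s j h; omega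
  | succ k ih =>
    intro s j h
    cases j with
    | zero => rfl
    | succ j =>
      show (tab f (s + 1) k).getD j d = _
      rw [ih _ _ (by omega)]; ring_nf

theorem tab_congr_lt {α : Type} (f g : Nat → α) : ∀ (k s : Nat), (∀ t, s ≤ t → t < s + k → f t = g t) → tab f s k = tab g s k := by
  intro k
  induction k with
  | zero => intro s _; rfl
  | succ k ih =>
    intro s h
    show f s :: tab f (s + 1) k = g s :: tab g (s + 1) k
    rw [h s (le_refl s) (by omega), ih (s + 1) (fun t h1 h2 => h t (by omega) (by omega))]

theorem tab_shift {α : Type} (f : Nat → α) : ∀ (k s : Nat), tab f (s + 1) k = tab (fun t => f (t + 1)) s k := by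
  intro k
  induction k with
  | zero => intro s; rfl
  | succ k ih =>
    intro s
    show f (s + 1) :: tab f (s + 2) k = f (s + 1) :: tab (fun t => f (t + 1)) (s + 1) k
    rw [ih]

theorem tab_append_one {α : Type} (f : Nat → α) : ∀ (k s : Nat), tab f s (k + 1) = tab f s k ++ [f (s + k)] := by
  intro k
  induction k with
  | zero => intro s; simp [tab]
  | succ k ih =>
    intro s
    show f s :: tab f (s + 1) (k + 1) = (f s :: tab f (s + 1) k) ++ [f (s + (k + 1))]
    rw [ih, show s + 1 + k = s + (k + 1) from by omega]
    rfl

theorem tab_append_zero {α : Type} (f : Nat → α) (k : Nat) : tab f 0 (k + 1) = tab f 0 k ++ [f k] := by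
  rw [tab_append_one]
  norm_num

theorem tab_zip_shift {α : Type} (f : Nat → α) : ∀ (k s : Nat), (tab f s (k + 1)).zip (tab f (s + 1) k) = tab (fun t => (f t, f (t + 1))) s k := by
  intro k
  induction k with
  | zero => intro s; rfl
  | succ k ih =>
    intro s
    show (f s, f (s + 1)) :: (tab f (s + 1) (k + 1)).zip (tab f (s + 2) k) = _
    rw [ih]; rfl

theorem list_zip_tab {α β : Type} (d : α) : ∀ (l : List α) (g : Nat → β), l.zip (tab g 0 l.length) = tab (fun t => (l.getD t d, g t)) 0 l.length := by
  intro l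
  induction l with
  | nil => intro g; rfl
  | cons x xs ih =>
    intro g
    show (x, g 0) :: xs.zip (tab g 1 xs.length) = (x, g 0) :: tab (fun t => ((x :: xs).getD t d, g t)) 1 xs.length
    congr 1
    rw [show tab g 1 xs.length = tab (fun t => g (t + 1)) 0 xs.length from tab_shift g xs.length 0, ih,
      show tab (fun t => ((x :: xs).getD t d, g t)) 1 xs.length
        = tab (fun t => ((x :: xs).getD (t + 1) d, g (t + 1))) 0 xs.length
        from tab_shift _ xs.length 0]
    apply tab_congr_lt
    intro t _ _
    simp

theorem range_map_tab {α : Type} (f : Nat → α) : ∀ (k : Nat), (List.range k).map f = tab f 0 k := by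
  intro k
  induction k with
  | zero => rfl
  | succ k ih => rw [List.range_succ, List.map_append, ih, tab_append_zero]; rfl

theorem getD_replicate_none : ∀ (k j : Nat), (List.replicate k (none : Option String)).getD j none = none := by
  intro k
  induction k with
  | zero => intro j; cases j <;> rfl
  | succ k ih =>
    intro j
    cases j with
    | zero => rfl
    | succ j => simpa [List.replicate_succ] using ih j

-- ---- A side: the dp/directions invariants of loopA ----

theorem rowA_spec (s1 s2 : List Char) (i : Nat) :
    ∀ (k j : Nat), j + k = s2.length →
      rowA (s1.getD i ' ') (dps s1 s2 (i + 1) j) (dps s1 s2 i j)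
        ((s2.drop j).zip (tab (fun t => dps s1 s2 i t) (j + 1) k))
      = tab (fun t => (dps s1 s2 (i + 1) t, dirS s1 s2 (i + 1) t)) (j + 1) k := by
  intro k
  induction k with
  | zero => intro j hj; simp [tab, rowA]
  | succ k ih =>
    intro j hj
    have hj' : j < s2.length := by omega
    rw [List.drop_eq_getElem_cons hj']
    have hg : s2[j] = s2.getD j ' ' := (List.getD_eq_getElem s2 ' ' hj').symm
    simp only [tab, List.zip_cons_cons, rowA, hg]
    have hstep := ih (j + 1) (by omega)
    by_cases h1 : s1.getD i ' ' = s2.getD j ' '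
    · have hd : dps s1 s2 (i + 1) (j + 1) = dps s1 s2 i j ++ [s1.getD i ' '] := by
        rw [dps_succ, if_pos h1]
      have hdir : dirS s1 s2 (i + 1) (j + 1) = some "diag" := by
        rw [dirS_succ, if_pos h1]
      rw [hd] at hstep
      rw [if_pos h1, hd, hdir, hstep]
    · by_cases h2 : (dps s1 s2 (i + 1) j).length ≤ (dps s1 s2 i (j + 1)).length
      · have hd : dps s1 s2 (i + 1) (j + 1) = dps s1 s2 i (j + 1) := by
          rw [dps_succ, if_neg h1, if_pos h2]
        have hdir : dirS s1 s2 (i + 1) (j + 1) = some "up" := by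
          rw [dirS_succ, if_neg h1, if_pos h2]
        rw [hd] at hstep
        rw [if_neg h1, if_pos h2, hd, hdir, hstep]
      · have hd : dps s1 s2 (i + 1) (j + 1) = dps s1 s2 (i + 1) j := by
          rw [dps_succ, if_neg h1, if_neg h2]
        have hdir : dirS s1 s2 (i + 1) (j + 1) = some "left" := by
          rw [dirS_succ, if_neg h1, if_neg h2]
        rw [hd] at hstep
        rw [if_neg h1, if_neg h2, hd, hdir, hstep]

theorem loopA_spec (s1 s2 : List Char) :
    ∀ (k i : Nat) (D : List (List (Option String))), i + k = s1.length →
      loopA s2 (s1.drop i) (tab (fun t => dps s1 s2 i t) 0 (s2.length + 1)) D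
      = (dps s1 s2 s1.length s2.length,
         D ++ tab (fun r => none :: tab (fun t => dirS s1 s2 r t) 1 s2.length) (i + 1) k) := by
  intro k
  induction k with
  | zero =>
    intro i D hi
    have hi0 : i = s1.length := by omega
    subst hi0
    rw [List.drop_length]
    show ((tab (fun t => dps s1 s2 s1.length t) 0 (s2.length + 1)).getLastD [], D) = _
    rw [tab_getLastD]
    simp [tab]
  | succ k ih =>
    intro i D hi
    have hi' : i < s1.length := by omega
    rw [List.drop_eq_getElem_cons hi']
    have hg : s1[i] = s1.getD i ' ' := (List.getD_eq_getElem s1 ' ' hi').symm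
    simp only [loopA, hg]
    have htab : tab (fun t => dps s1 s2 i t) 0 (s2.length + 1)
        = dps s1 s2 i 0 :: tab (fun t => dps s1 s2 i t) 1 s2.length := rfl
    rw [htab]
    simp only [List.headD_cons, List.drop_succ_cons, List.drop_zero]
    have hrow := rowA_spec s1 s2 i s2.length 0 (by omega)
    simp only [Nat.zero_add, List.drop_zero] at hrow
    rw [dps_zero_right s1 s2 (i + 1)] at hrow
    rw [hrow, tab_map_fst, tab_map_snd]
    have hnew : ([] : List Char) :: tab (fun t => dps s1 s2 (i + 1) t) 1 s2.length
        = tab (fun t => dps s1 s2 (i + 1) t) 0 (s2.length + 1) := by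
      show _ = dps s1 s2 (i + 1) 0 :: tab (fun t => dps s1 s2 (i + 1) t) 1 s2.length
      rw [dps_zero_right]
    rw [hnew, ih (i + 1) _ (by omega), List.append_assoc]
    rfl

theorem lcsA_norm (a b : String) :
    lcsA a b = (String.mk (dps a.toList b.toList a.toList.length b.toList.length), dirsMat a.toList b.toList) := by
  show (String.mk (loopA b.toList a.toList (List.replicate (b.toList.length + 1) []) [List.replicate (b.toList.length + 1) none]).1,
        (loopA b.toList a.toList (List.replicate (b.toList.length + 1) []) [List.replicate (b.toList.length + 1) none]).2) = _
  have hcA : List.replicate (b.toList.length + 1) ([] : List Char)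
      = tab (fun t => dps a.toList b.toList 0 t) 0 (b.toList.length + 1) :=
    (tab_const _ _ (fun t => dps_zero_left a.toList b.toList t) _ _).symm
  have hA := loopA_spec a.toList b.toList a.toList.length 0 [List.replicate (b.toList.length + 1) none] (by omega)
  simp only [Nat.zero_add, List.drop_zero] at hA
  rw [hcA, hA]
  rfl

-- ---- B side: the length table, the derived directions, the backtrack ----

theorem rowLenB_spec (a b : List Char) (i : Nat) :
    rowLenB (a.getD i ' ') b (tab (fun t => (dps a b i t).length) 0 (b.length + 1))
      = tab (fun t => (dps a b (i + 1) t).length) 0 (b.length + 1) := by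
  have hzip : b.zip ((tab (fun t => (dps a b i t).length) 0 (b.length + 1)).zip
        ((tab (fun t => (dps a b i t).length) 0 (b.length + 1)).drop 1))
      = tab (fun t => (b.getD t ' ', (dps a b i t).length, (dps a b i (t + 1)).length)) 0 b.length := by
    have hdrop : (tab (fun t => (dps a b i t).length) 0 (b.length + 1)).drop 1
        = tab (fun t => (dps a b i t).length) 1 b.length := rfl
    have hpairs : (tab (fun t => (dps a b i t).length) 0 (b.length + 1)).zip
          (tab (fun t => (dps a b i t).length) 1 b.length)
        = tab (fun t => ((dps a b i t).length, (dps a b i (t + 1)).length)) 0 b.length := by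
      simpa using tab_zip_shift (fun t => (dps a b i t).length) b.length 0
    rw [hdrop, hpairs, list_zip_tab ' ' b (fun t => ((dps a b i t).length, (dps a b i (t + 1)).length))]
  -- fold invariant: after consuming the first j triples the accumulator is row (i+1) up to column j
  have key : ∀ (k j : Nat), j + k = b.length →
      (tab (fun t => (b.getD t ' ', (dps a b i t).length, (dps a b i (t + 1)).length)) j k).foldl
        (fun cur p => cur ++ [if a.getD i ' ' = p.1 then p.2.1 + 1 else max p.2.2 (cur.getLastD 0)])
        (tab (fun t => (dps a b (i + 1) t).length) 0 (j + 1))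
      = tab (fun t => (dps a b (i + 1) t).length) 0 (b.length + 1) := by
    intro k
    induction k with
    | zero =>
      intro j hj
      have hjm : j = b.length := by omega
      subst hjm
      rfl
    | succ k ih =>
      intro j hj
      have hcons : tab (fun t => (b.getD t ' ', (dps a b i t).length, (dps a b i (t + 1)).length)) j (k + 1)
          = (b.getD j ' ', (dps a b i j).length, (dps a b i (j + 1)).length)
            :: tab (fun t => (b.getD t ' ', (dps a b i t).length, (dps a b i (t + 1)).length)) (j + 1) k := rfl
      rw [hcons, List.foldl_cons]
      have hlast : (tab (fun t => (dps a b (i + 1) t).length) 0 (j + 1)).getLastD 0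
          = (dps a b (i + 1) j).length := by
        simpa using tab_getLastD (fun t => (dps a b (i + 1) t).length) j 0 0
      have hval : (if a.getD i ' ' = b.getD j ' ' then (dps a b i j).length + 1
          else max (dps a b i (j + 1)).length (dps a b (i + 1) j).length)
          = (dps a b (i + 1) (j + 1)).length := by
        by_cases h1 : a.getD i ' ' = b.getD j ' '
        · rw [if_pos h1, dps_succ, if_pos h1]
          simp
        · rw [if_neg h1, dps_succ, if_neg h1]
          by_cases h2 : (dps a b (i + 1) j).length ≤ (dps a b i (j + 1)).length
          · rw [if_pos h2, Nat.max_eq_left h2]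
          · rw [if_neg h2, Nat.max_eq_right (Nat.le_of_lt (Nat.lt_of_not_le h2))]
      have hT : tab (fun t => (dps a b (i + 1) t).length) 0 (j + 1 + 1)
          = tab (fun t => (dps a b (i + 1) t).length) 0 (j + 1) ++ [(dps a b (i + 1) (j + 1)).length] := by
        rw [tab_append_zero]
      simp only [hlast]
      rw [hval, ← hT]
      exact ih (j + 1) (by omega)
  have hinit : [(0 : Nat)] = tab (fun t => (dps a b (i + 1) t).length) 0 1 := by
    show [0] = [(dps a b (i + 1) 0).length]
    rw [dps_zero_right]
    rfl
  rw [rowLenB, hzip, hinit]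
  exact key b.length 0 (by omega)

theorem tableB_spec (a b : List Char) :
    tableB a b = tab (fun r => tab (fun t => (dps a b r t).length) 0 (b.length + 1)) 0 (a.length + 1) := by
  have key : ∀ (k i : Nat), i + k = a.length →
      (a.drop i).foldl (fun T c => T ++ [rowLenB c b (T.getLastD [])])
        (tab (fun r => tab (fun t => (dps a b r t).length) 0 (b.length + 1)) 0 (i + 1))
      = tab (fun r => tab (fun t => (dps a b r t).length) 0 (b.length + 1)) 0 (a.length + 1) := by
    intro k
    induction k with
    | zero =>
      intro i hi
      have him : i = a.length := by omega
      subst him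
      rw [List.drop_length]
      rfl
    | succ k ih =>
      intro i hi
      have hi' : i < a.length := by omega
      rw [List.drop_eq_getElem_cons hi', List.foldl_cons]
      have hg : a[i] = a.getD i ' ' := (List.getD_eq_getElem a ' ' hi').symm
      have hlast : (tab (fun r => tab (fun t => (dps a b r t).length) 0 (b.length + 1)) 0 (i + 1)).getLastD []
          = tab (fun t => (dps a b i t).length) 0 (b.length + 1) := by
        simpa using tab_getLastD (fun r => tab (fun t => (dps a b r t).length) 0 (b.length + 1)) i 0 []
      have hT : tab (fun r => tab (fun t => (dps a b r t).length) 0 (b.length + 1)) 0 (i + 1 + 1)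
          = tab (fun r => tab (fun t => (dps a b r t).length) 0 (b.length + 1)) 0 (i + 1)
            ++ [tab (fun t => (dps a b (i + 1) t).length) 0 (b.length + 1)] := by
        rw [tab_append_zero]
      simp only [hlast]
      rw [hg, rowLenB_spec, ← hT]
      exact ih (i + 1) (by omega)
  have hinit : [List.replicate (b.length + 1) (0 : Nat)]
      = tab (fun r => tab (fun t => (dps a b r t).length) 0 (b.length + 1)) 0 1 := by
    show [List.replicate (b.length + 1) (0 : Nat)] = [tab (fun t => (dps a b 0 t).length) 0 (b.length + 1)]
    rw [tab_const (fun t => (dps a b 0 t).length) 0 (fun t => by show (dps a b 0 t).length = 0; rw [dps_zero_left]; rfl)]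
  rw [tableB, hinit]
  simpa using key a.length 0 (by omega)

theorem dirsB_spec (a b : List Char) :
    dirsB a b (tableB a b) = dirsMat a b := by
  rw [tableB_spec, dirsB, dirsMat, range_map_tab]
  congr 1
  rw [tab_shift]
  apply tab_congr_lt
  intro i _ hi
  simp only [Nat.zero_add] at hi
  have hTi : (tab (fun r => tab (fun t => (dps a b r t).length) 0 (b.length + 1)) 0 (a.length + 1)).getD i []
      = tab (fun t => (dps a b i t).length) 0 (b.length + 1) := by
    rw [tab_getD _ _ _ _ _ (by omega)]
    norm_num
  have hTi1 : (tab (fun r => tab (fun t => (dps a b r t).length) 0 (b.length + 1)) 0 (a.length + 1)).getD (i + 1) []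
      = tab (fun t => (dps a b (i + 1) t).length) 0 (b.length + 1) := by
    rw [tab_getD _ _ _ _ _ (by omega)]
    norm_num
  rw [hTi, hTi1, dirRowB, range_map_tab]
  congr 1
  rw [tab_shift]
  apply tab_congr_lt
  intro j _ hj
  simp only [Nat.zero_add] at hj
  rw [tab_getD _ _ _ _ _ (by omega), tab_getD _ _ _ _ _ (by omega), dirS_succ]
  simp only [Nat.zero_add]

theorem getD_dirsMat (s1 s2 : List Char) (i j : Nat) (hi : i ≤ s1.length) (hj : j ≤ s2.length) :
    ((dirsMat s1 s2).getD i []).getD j none = dirS s1 s2 i j := by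
  cases i with
  | zero =>
    show (List.replicate (s2.length + 1) (none : Option String)).getD j none = dirS s1 s2 0 j
    rw [getD_replicate_none]
    rfl
  | succ i =>
    show ((tab (fun r => none :: tab (fun t => dirS s1 s2 r t) 1 s2.length) 1 s1.length).getD i []).getD j none = _
    rw [tab_getD _ _ _ _ _ (by omega)]
    cases j with
    | zero =>
      show (none : Option String) = dirS s1 s2 (i + 1) 0
      rfl
    | succ j =>
      show (tab (fun t => dirS s1 s2 (1 + i) t) 1 s2.length).getD j none = _
      rw [tab_getD _ _ _ _ _ (by omega)]
      have e1 : 1 + i = i + 1 := by omega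
      have e2 : 1 + j = j + 1 := by omega
      rw [e1, e2]

theorem backtrack_spec (s1 s2 : List Char) :
    ∀ (N i j : Nat) (acc : List Char), i + j ≤ N → i ≤ s1.length → j ≤ s2.length →
      backtrack (dirsMat s1 s2) s1 i j acc = dps s1 s2 i j ++ acc := by
  intro N
  induction N with
  | zero =>
    intro i j acc hN hi hj
    have h0 : i = 0 ∧ j = 0 := by omega
    rw [backtrack]
    simp [h0.1, h0.2, dps_zero_left]
  | succ N ih =>
    intro i j acc hN hi hj
    cases i with
    | zero =>
      rw [backtrack]
      simp [dps_zero_left]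
    | succ i =>
      cases j with
      | zero =>
        rw [backtrack]
        simp [dps_zero_right]
      | succ j =>
        rw [backtrack, dif_pos ⟨Nat.succ_pos i, Nat.succ_pos j⟩,
          getD_dirsMat s1 s2 (i + 1) (j + 1) hi hj, dirS_succ]
        by_cases h1 : s1.getD i ' ' = s2.getD j ' '
        · rw [if_pos h1, if_pos rfl]
          simp only [Nat.add_sub_cancel]
          rw [ih i j _ (by omega) (by omega) (by omega)]
          rw [dps_succ, if_pos h1, List.append_assoc]
          rfl
        · by_cases h2 : (dps s1 s2 (i + 1) j).length ≤ (dps s1 s2 i (j + 1)).length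
          · rw [if_neg h1, if_pos h2, if_neg (by decide), if_pos rfl]
            simp only [Nat.add_sub_cancel]
            rw [ih i (j + 1) _ (by omega) (by omega) (by omega)]
            rw [dps_succ, if_neg h1, if_pos h2]
          · rw [if_neg h1, if_neg h2, if_neg (by decide), if_neg (by decide)]
            simp only [Nat.add_sub_cancel]
            rw [ih (i + 1) j _ (by omega) (by omega) (by omega)]
            rw [dps_succ, if_neg h1, if_neg h2]

theorem lcsB_norm (a b : String) :
    lcsB a b = (String.mk (dps a.toList b.toList a.toList.length b.toList.length), dirsMat a.toList b.toList) := by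
  show (String.mk (backtrack (dirsB a.toList b.toList (tableB a.toList b.toList)) a.toList a.toList.length b.toList.length []),
        dirsB a.toList b.toList (tableB a.toList b.toList)) = _
  rw [dirsB_spec,
    backtrack_spec a.toList b.toList (a.toList.length + b.toList.length) _ _ _ (le_refl _) (le_refl _) (le_refl _),
    List.append_nil]

theorem lcsA_eq_lcsB (a b : String) : lcsA a b = lcsB a b := by
  rw [lcsA_norm, lcsB_norm]

-- ---- the outer aggregations agree ----

theorem foldl_stopped : ∀ (l : List String) (c : String) (d : List (List (Option String))),
    l.foldl stepR (c, d, true) = (c, d, true) := by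
  intro l
  induction l with
  | nil => intro c d; rfl
  | cons t rest ih =>
    intro c d
    show rest.foldl stepR (stepR (c, d, true) t) = _
    rw [show stepR (c, d, true) t = (c, d, true) from rfl, ih]

theorem innerA_fold : ∀ (l : List String) (c : String) (d : List (List (Option String))),
    innerA c d l = ((l.foldl stepR (c, d, false)).1, (l.foldl stepR (c, d, false)).2.1) := by
  intro l
  induction l with
  | nil => intro c d; rfl
  | cons t rest ih =>
    intro c d
    show (let r := lcsA c t; if r.1 = "" then r else innerA r.1 r.2 rest)
      = ((rest.foldl stepR (stepR (c, d, false) t)).1, (rest.foldl stepR (stepR (c, d, false) t)).2.1)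
    have hstep : stepR (c, d, false) t = ((lcsB c t).1, (lcsB c t).2, decide ((lcsB c t).1 = "")) := rfl
    rw [hstep, lcsA_eq_lcsB]
    by_cases h : (lcsB c t).1 = ""
    · simp only [h, decide_true, if_pos]
      rw [foldl_stopped]
      simp [Prod.ext_iff, h]
    · simp only [h, decide_false]
      exact ih (lcsB c t).1 (lcsB c t).2

theorem fold_init_dirs (t : String) (rest : List String) (c : String)
    (d e : List (List (Option String))) :
    (t :: rest).foldl stepR (c, d, false) = (t :: rest).foldl stepR (c, e, false) := by
  show rest.foldl stepR (stepR (c, d, false) t) = rest.foldl stepR (stepR (c, e, false) t)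
  rfl

theorem innerA_reduceB (seqs : List String) (h : seqs ≠ []) (s : String) (d : List (List (Option String))) :
    innerA s d seqs = reduceB seqs s := by
  cases seqs with
  | nil => exact absurd rfl h
  | cons t rest =>
    rw [innerA_fold, reduceB, fold_init_dirs t rest s d []]

theorem getLastD_snd {α β : Type} (xs : List (α × β)) (p q : α × β) (h : p.2 = q.2) :
    (xs.getLastD p).2 = (xs.getLastD q).2 := by
  cases xs with
  | nil => exact h
  | cons x l => rw [List.getLastD_cons, List.getLastD_cons]

theorem outerA_fold (seqs : List String) (h : seqs ≠ []) :
    ∀ (l : List String) (m : String) (d : List (List (Option String))),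
      outerA seqs m d l
      = ((l.map (reduceB seqs)).foldl bestStep m, ((l.map (reduceB seqs)).getLastD ("", d)).2) := by
  intro l
  induction l with
  | nil => intro m d; rfl
  | cons s rest ih =>
    intro m d
    show (let r := innerA s d seqs;
          outerA seqs (if m.length < r.1.length then r.1 else m) r.2 rest) = _
    rw [innerA_reduceB seqs h s d]
    rw [ih (if m.length < (reduceB seqs s).1.length then (reduceB seqs s).1 else m) (reduceB seqs s).2]
    show (_, ((rest.map (reduceB seqs)).getLastD ("", (reduceB seqs s).2)).2)
      = ((rest.map (reduceB seqs)).foldl bestStep (bestStep m (reduceB seqs s)),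
         ((reduceB seqs s :: rest.map (reduceB seqs)).getLastD ("", d)).2)
    rw [List.getLastD_cons]
    exact congrArg₂ _ rfl (getLastD_snd _ _ _ rfl)

-- ===== VERDICT (by name: the statement is the Claim_ definition above) =====
theorem lcs_multiple_spec : Claim_equal_lcs_multiple := by
  intro seqs _ hpre
  unfold Spec_lcs_multiple lcs_multiple lcs_multiple_alt
  rw [outerA_fold seqs hpre seqs "" []]
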